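-- pv_equiv track=rewrite | github.com/virtual-context/virtual-context | virtual_context/core/quote_search.py | _filter_exact_value_results
-- ===== SOURCE A (Python) =====
-- def _filter_exact_value_results(
--     formatted: list[dict[str, object]],
--     chosen_candidate: dict[str, object] | None,
--     conflicting_candidates: list[dict[str, object]] | None,
-- ) -> list[dict[str, object]]:
--     excerpts: list[str] = []
--     if chosen_candidate:
--         excerpt = str(chosen_candidate.get("excerpt", "")).strip()
--         if excerpt:
--             excerpts.append(excerpt)
--     elif conflicting_candidates:
--         for candidate in conflicting_candidates:
--             excerpt = str(candidate.get("excerpt", "")).strip()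
--             if excerpt and excerpt not in excerpts:
--                 excerpts.append(excerpt)
--
--     if not excerpts:
--         return formatted
--
--     prioritized: list[dict[str, object]] = []
--     remainder = list(formatted)
--     for excerpt in excerpts:
--         for idx, row in enumerate(remainder):
--             if str(row.get("excerpt", "")).strip() == excerpt:
--                 prioritized.append(remainder.pop(idx))
--                 break
--     return prioritized + remainder
-- ===== SOURCE B (Python) =====
-- def _filter_exact_value_results(
--     formatted,
--     chosen_candidate,
--     conflicting_candidates,
-- ):
--     # Collect the candidate excerpts (deduplicated, in order).
--     if chosen_candidate:
--         e = str(chosen_candidate.get("excerpt", "")).strip()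
--         excerpts = [e] if e else []
--     elif conflicting_candidates:
--         seen = set()
--         excerpts = []
--         for cand in conflicting_candidates:
--             e = str(cand.get("excerpt", "")).strip()
--             if e and e not in seen:
--                 seen.add(e)
--                 excerpts.append(e)
--     else:
--         excerpts = []
--
--     if not excerpts:
--         return formatted
--
--     # Single pass over `formatted`: pick out, for each wanted excerpt, the
--     # first row carrying it; everything else keeps its order in `rest`.
--     wanted = set(excerpts)
--     slot = {}
--     rest = []
--     for row in formatted:
--         e = str(row.get("excerpt", "")).strip()
--         if e in wanted and e not in slot:
--             slot[e] = row
--         else: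
--             rest.append(row)
--     return [slot[e] for e in excerpts if e in slot] + rest
-- ===== Notes on version B (the rewrite author's own statement) =====
-- stated objective: alternative
-- what changed: Replaces the nested loop (for each excerpt, scan-and-pop the remainder list) by one single pass over the rows that fills a first-match dict keyed by stripped excerpt and partitions prioritized/rest in place.
import Mathlib
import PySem

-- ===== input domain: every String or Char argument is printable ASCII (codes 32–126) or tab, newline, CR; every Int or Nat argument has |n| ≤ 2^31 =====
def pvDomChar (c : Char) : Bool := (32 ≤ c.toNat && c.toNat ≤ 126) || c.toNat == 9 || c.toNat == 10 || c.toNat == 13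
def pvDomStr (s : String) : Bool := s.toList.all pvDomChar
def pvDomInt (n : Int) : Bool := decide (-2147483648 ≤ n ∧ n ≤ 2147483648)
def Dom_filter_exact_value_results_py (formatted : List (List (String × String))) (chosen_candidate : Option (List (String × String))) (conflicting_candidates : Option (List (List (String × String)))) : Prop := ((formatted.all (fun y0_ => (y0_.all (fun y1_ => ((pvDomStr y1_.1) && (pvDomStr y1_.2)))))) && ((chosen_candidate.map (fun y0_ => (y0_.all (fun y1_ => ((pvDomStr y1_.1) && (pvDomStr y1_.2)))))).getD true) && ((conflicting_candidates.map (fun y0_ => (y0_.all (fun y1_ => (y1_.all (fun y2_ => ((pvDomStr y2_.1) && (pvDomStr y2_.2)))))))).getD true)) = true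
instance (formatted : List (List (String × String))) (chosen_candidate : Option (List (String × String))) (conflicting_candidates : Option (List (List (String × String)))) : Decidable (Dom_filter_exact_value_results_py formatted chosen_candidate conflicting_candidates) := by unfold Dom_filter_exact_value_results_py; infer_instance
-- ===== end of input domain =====

-- B replaces A's excerpt-by-excerpt scan-and-pop of the remainder list by a single pass
-- over the rows building a first-match dict and a rest list (objective: alternative).


-- shared helper: str(row.get("excerpt", "")).strip()  (values are strings, so str() is the
-- identity; association-list lookup is first-match per the type convention)
def pvKey (r : List (String × String)) : String :=
  PySem.Str.strip ((r.lookup "excerpt").getD "")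

-- ===== PORT A =====

-- inner loop: 'for idx, row in enumerate(remainder): if …: prioritized.append(remainder.pop(idx)); break'
def pvPopFirst (e : String) : List (List (String × String)) → Option ((List (String × String)) × List (List (String × String)))
  | [] => none
  | r :: rs =>
      if pvKey r = e then some (r, rs)
      else match pvPopFirst e rs with
        | some (x, rest) => some (x, r :: rest)
        | none => none

-- the excerpt-collection block of A (if chosen_candidate: … elif conflicting_candidates: …)
def pvExcerptsA : Option (List (String × String)) → Option (List (List (String × String))) → List String
  | some (p :: ps), _ =>
      let e := pvKey (p :: ps)
      if e ≠ "" then [e] else []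
  | _, some (c :: cs) =>
      (c :: cs).foldl (fun acc cand =>
        let e := pvKey cand
        if e ≠ "" ∧ e ∉ acc then acc ++ [e] else acc) []
  | _, _ => []

def filter_exact_value_results_py (formatted : List (List (String × String))) (chosen_candidate : Option (List (String × String))) (conflicting_candidates : Option (List (List (String × String)))) : List (List (String × String)) :=
  let excerpts := pvExcerptsA chosen_candidate conflicting_candidates
  if excerpts = [] then formatted
  else
    let st := excerpts.foldl (fun (st : List (List (String × String)) × List (List (String × String))) e =>
      match pvPopFirst e st.2 with
      | some (row, rem') => (st.1 ++ [row], rem')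
      | none => st) ([], formatted)
    st.1 ++ st.2

-- ===== PORT B =====

-- the excerpt-collection block of B (same chosen branch; dedup via a `seen` set)
def pvExcerptsB : Option (List (String × String)) → Option (List (List (String × String))) → List String
  | some (p :: ps), _ =>
      let e := pvKey (p :: ps)
      if e ≠ "" then [e] else []
  | _, some (c :: cs) =>
      ((c :: cs).foldl (fun (st : PySem.Set String × List String) cand =>
        let e := pvKey cand
        if e ≠ "" ∧ ¬ (PySem.Set.contains st.1 e = true) then (PySem.Set.add st.1 e, st.2 ++ [e]) else st)
        (PySem.Set.empty, [])).2
  | _, _ => []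

def filter_exact_value_results_py_alt (formatted : List (List (String × String))) (chosen_candidate : Option (List (String × String))) (conflicting_candidates : Option (List (List (String × String)))) : List (List (String × String)) :=
  let excerpts := pvExcerptsB chosen_candidate conflicting_candidates
  if excerpts = [] then formatted
  else
    let wanted : PySem.Set String := PySem.Set.ofList excerpts
    let st := formatted.foldl (fun (st : PySem.Dict String (List (String × String)) × List (List (String × String))) row =>
      let e := pvKey row
      if PySem.Set.contains wanted e = true ∧ st.1.get? e = none then (st.1.insert e row, st.2)
      else (st.1, st.2 ++ [row])) (PySem.Dict.empty, [])
    excerpts.filterMap (fun e => st.1.get? e) ++ st.2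

-- ===== PRECONDITION & SPEC =====
def Spec_filter_exact_value_results_py (formatted : List (List (String × String))) (chosen_candidate : Option (List (String × String))) (conflicting_candidates : Option (List (List (String × String)))) (out : List (List (String × String))) : Prop := out = filter_exact_value_results_py_alt formatted chosen_candidate conflicting_candidates
instance (formatted : List (List (String × String))) (chosen_candidate : Option (List (String × String))) (conflicting_candidates : Option (List (List (String × String)))) (out : List (List (String × String))) : Decidable (Spec_filter_exact_value_results_py formatted chosen_candidate conflicting_candidates out) := by unfold Spec_filter_exact_value_results_py; infer_instance

-- ===== CLAIM (what is proved, stated in full; the proofs are below) =====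
def Claim_equal_filter_exact_value_results_py : Prop := ∀ (formatted : List (List (String × String))) (chosen_candidate : Option (List (String × String))) (conflicting_candidates : Option (List (List (String × String)))), Dom_filter_exact_value_results_py formatted chosen_candidate conflicting_candidates → Spec_filter_exact_value_results_py formatted chosen_candidate conflicting_candidates (filter_exact_value_results_py formatted chosen_candidate conflicting_candidates)

-- ===== LEMMAS AND PROOFS =====

-- A's main loop, unrolled as recursion on the excerpt list
def pvRecd : List String → List (List (String × String)) → List (List (String × String))
  | [], rem => rem
  | e :: es, rem =>
      match pvPopFirst e rem with
      | some (r, rem') => r :: pvRecd es rem'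
      | none => pvRecd es rem

-- the prioritized block, read off the ORIGINAL list
def pvP (es : List String) (rem : List (List (String × String))) : List (List (String × String)) :=
  es.filterMap (fun e => (pvPopFirst e rem).map Prod.fst)

-- the rest block: a left-to-right scan dropping the first row of each not-yet-used wanted key
def pvR (es : List String) : (String → Bool) → List (List (String × String)) → List (List (String × String))
  | _, [] => []
  | used, r :: rs =>
      let e := pvKey r
      if e ∈ es ∧ used e = false then pvR es (fun k => (k == e) || used k) rs
      else r :: pvR es used rs

-- the two excerpt-collection blocks agree (invariant: the `seen` set has the members of the list)
theorem exFold (cs : List (List (String × String))) :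
    ∀ (seen : PySem.Set String) (acc : List String),
    (∀ k, PySem.Set.contains seen k = true ↔ k ∈ acc) →
    (cs.foldl (fun (st : PySem.Set String × List String) cand =>
        let e := pvKey cand
        if e ≠ "" ∧ ¬ (PySem.Set.contains st.1 e = true) then (PySem.Set.add st.1 e, st.2 ++ [e]) else st)
      (seen, acc)).2
    = cs.foldl (fun acc cand =>
        let e := pvKey cand
        if e ≠ "" ∧ e ∉ acc then acc ++ [e] else acc) acc := by
  induction cs with
  | nil => intro seen acc h; rfl
  | cons c cs ih =>
      intro seen acc h
      simp only [List.foldl_cons]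
      have hiff : (pvKey c ≠ "" ∧ ¬ (PySem.Set.contains seen (pvKey c) = true)) ↔ (pvKey c ≠ "" ∧ pvKey c ∉ acc) := by
        constructor
        · rintro ⟨h1, h2⟩; exact ⟨h1, fun hm => h2 ((h _).mpr hm)⟩
        · rintro ⟨h1, h2⟩; exact ⟨h1, fun hc => h2 ((h _).mp hc)⟩
      by_cases h1 : pvKey c ≠ "" ∧ pvKey c ∉ acc
      · rw [if_pos (hiff.mpr h1), if_pos h1]
        refine ih _ _ ?_
        intro k
        have hk := h k
        simp only [PySem.Set.contains_eq_listContains, List.contains_iff_mem] at hk ⊢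
        rw [PySem.Set.mem_add]
        simp only [List.mem_append, List.mem_singleton, hk]
      · rw [if_neg (fun hc => h1 (hiff.mp hc)), if_neg h1]
        exact ih _ _ h

theorem excerptsB_eq_A (ch : Option (List (String × String))) (cf : Option (List (List (String × String)))) :
    pvExcerptsB ch cf = pvExcerptsA ch cf := by
  match ch, cf with
  | some (p :: ps), _ => rfl
  | some [], some (c :: cs) =>
      exact exFold (c :: cs) PySem.Set.empty []
        (by intro k; simp [PySem.Set.contains_eq_listContains, PySem.Set.empty])
  | none, some (c :: cs) =>
      exact exFold (c :: cs) PySem.Set.empty []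
        (by intro k; simp [PySem.Set.contains_eq_listContains, PySem.Set.empty])
  | some [], none => rfl
  | none, none => rfl
  | some [], some [] => rfl
  | none, some [] => rfl

-- the collected excerpts are duplicate-free
theorem nodupFold (cs : List (List (String × String))) :
    ∀ (acc : List String), acc.Nodup →
    (cs.foldl (fun acc cand =>
        let e := pvKey cand
        if e ≠ "" ∧ e ∉ acc then acc ++ [e] else acc) acc).Nodup := by
  induction cs with
  | nil => intro acc h; exact h
  | cons c cs ih =>
      intro acc h
      simp only [List.foldl_cons]
      by_cases h1 : pvKey c ≠ "" ∧ pvKey c ∉ acc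
      · rw [if_pos h1]
        exact ih _ (h.append (List.nodup_singleton _) (by simpa using h1.2))
      · rw [if_neg h1]; exact ih _ h

theorem excerptsA_nodup (ch : Option (List (String × String))) (cf : Option (List (List (String × String)))) :
    (pvExcerptsA ch cf).Nodup := by
  match ch, cf with
  | some (p :: ps), _ =>
      show ((if pvKey (p :: ps) ≠ "" then [pvKey (p :: ps)] else []) : List String).Nodup
      split <;> simp
  | some [], some (c :: cs) => exact nodupFold (c :: cs) [] List.nodup_nil
  | none, some (c :: cs) => exact nodupFold (c :: cs) [] List.nodup_nil
  | some [], none => exact List.nodup_nil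
  | none, none => exact List.nodup_nil
  | some [], some [] => exact List.nodup_nil
  | none, some [] => exact List.nodup_nil

-- A's foldl over the excerpts equals pvRecd
theorem foldA_eq_recd (es : List String) : ∀ (p rem : List (List (String × String))),
    (es.foldl (fun (st : List (List (String × String)) × List (List (String × String))) e =>
      match pvPopFirst e st.2 with
      | some (row, rem') => (st.1 ++ [row], rem')
      | none => st) (p, rem)).1 ++
    (es.foldl (fun (st : List (List (String × String)) × List (List (String × String))) e =>
      match pvPopFirst e st.2 with
      | some (row, rem') => (st.1 ++ [row], rem')
      | none => st) (p, rem)).2 = p ++ pvRecd es rem := by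
  induction es with
  | nil => intro p rem; simp [pvRecd]
  | cons e es ih =>
      intro p rem
      simp only [List.foldl_cons, pvRecd]
      cases hpf : pvPopFirst e rem with
      | none => simp only [hpf]; exact ih p rem
      | some pr =>
          obtain ⟨r, rem'⟩ := pr
          simp only [hpf]
          rw [ih (p ++ [r]) rem']
          simp

-- pvR depends on `used` only pointwise
theorem pvR_congr (es : List String) : ∀ (rem : List (List (String × String))) (u v : String → Bool),
    (∀ k, u k = v k) → pvR es u rem = pvR es v rem := by
  intro rem
  induction rem with
  | nil => intro u v h; rfl
  | cons r rs ih =>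
      intro u v h
      simp only [pvR]
      by_cases hc : pvKey r ∈ es ∧ u (pvKey r) = false
      · rw [if_pos hc, if_pos ⟨hc.1, (h _) ▸ hc.2⟩]
        exact ih _ _ (fun k => by simp [h k])
      · rw [if_neg hc, if_neg (fun hc' => hc ⟨hc'.1, (h _).symm ▸ hc'.2⟩)]
        rw [ih _ _ h]

theorem map_fst_consCase (r0 : List (String × String)) (o : Option ((List (String × String)) × List (List (String × String)))) :
    (match o with | some (x, rest) => some (x, r0 :: rest) | none => none).map
        (Prod.fst (α := List (String × String)) (β := List (List (String × String))))
      = o.map Prod.fst := by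
  cases o with
  | none => rfl
  | some pr => obtain ⟨x, rest⟩ := pr; rfl

-- popping one key leaves the first match of any other key unchanged
theorem popFirst_other (e e' : String) (hne : e' ≠ e) :
    ∀ (rem rem' : List (List (String × String))) (r : List (String × String)),
    pvPopFirst e rem = some (r, rem') →
    (pvPopFirst e' rem').map Prod.fst = (pvPopFirst e' rem).map Prod.fst := by
  intro rem
  induction rem with
  | nil => intro rem' r h; simp [pvPopFirst] at h
  | cons r0 rs ih =>
      intro rem' r h
      by_cases h0 : pvKey r0 = e
      · simp only [pvPopFirst, if_pos h0, Option.some.injEq, Prod.mk.injEq] at h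
        obtain ⟨h1, h2⟩ := h
        subst h2
        have hne0 : ¬ pvKey r0 = e' := fun hh => hne (by rw [← hh, h0])
        simp only [pvPopFirst, if_neg hne0]
        exact (map_fst_consCase r0 _).symm
      · simp only [pvPopFirst, if_neg h0] at h
        cases hq : pvPopFirst e rs with
        | none => rw [hq] at h; simp at h
        | some pr =>
            obtain ⟨x, rest⟩ := pr
            rw [hq] at h
            simp only [Option.some.injEq, Prod.mk.injEq] at h
            obtain ⟨h1, h2⟩ := h
            subst h2
            by_cases h0' : pvKey r0 = e'
            · simp only [pvPopFirst, if_pos h0']; rfl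
            · simp only [pvPopFirst, if_neg h0']
              rw [map_fst_consCase, map_fst_consCase]
              exact ih _ _ hq

theorem pvR_head_absorb (e : String) (es : List String) (he : e ∉ es) :
    ∀ (rs : List (List (String × String))) (u : String → Bool),
    pvR (e :: es) (fun k => (k == e) || u k) rs = pvR es u rs := by
  intro rs
  induction rs with
  | nil => intro u; rfl
  | cons r1 t ih =>
      intro u
      simp only [pvR]
      by_cases h1 : pvKey r1 = e
      · rw [if_neg (by simp [h1]), if_neg (by simp [h1, he])]
        rw [ih u]
      · have hmem : pvKey r1 ∈ e :: es ↔ pvKey r1 ∈ es := by simp [h1]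
        have hor : ((pvKey r1 == e) || u (pvKey r1)) = u (pvKey r1) := by
          simp [h1]
        by_cases hc : pvKey r1 ∈ es ∧ u (pvKey r1) = false
        · rw [if_pos ⟨hmem.mpr hc.1, by rw [hor]; exact hc.2⟩, if_pos hc]
          rw [pvR_congr (e :: es) t (fun k => (k == pvKey r1) || ((k == e) || u k))
                (fun k => (k == e) || ((k == pvKey r1) || u k))
                (fun k => Bool.or_left_comm _ _ _)]
          exact ih _
        · rw [if_neg (fun hc' => hc ⟨hmem.mp hc'.1, by rw [← hor]; exact hc'.2⟩), if_neg hc]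
          rw [ih u]

theorem pvR_erase (e : String) (es : List String) (he : e ∉ es) :
    ∀ (rem rem' : List (List (String × String))) (r : List (String × String)) (u : String → Bool),
    u e = false → pvPopFirst e rem = some (r, rem') →
    pvR (e :: es) u rem = pvR es u rem' := by
  intro rem
  induction rem with
  | nil => intro rem' r u hu h; simp [pvPopFirst] at h
  | cons r0 rs ih =>
      intro rem' r u hu h
      by_cases h0 : pvKey r0 = e
      · simp only [pvPopFirst, if_pos h0, Option.some.injEq, Prod.mk.injEq] at h
        obtain ⟨h1, h2⟩ := h
        subst h2
        simp only [pvR]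
        rw [if_pos ⟨by simp [h0], by rw [h0]; exact hu⟩]
        rw [pvR_congr _ _ _ (fun k => (k == e) || u k) (fun k => by rw [h0])]
        exact pvR_head_absorb e es he rs u
      · simp only [pvPopFirst, if_neg h0] at h
        cases hq : pvPopFirst e rs with
        | none => rw [hq] at h; simp at h
        | some pr =>
            obtain ⟨x, rest⟩ := pr
            rw [hq] at h
            simp only [Option.some.injEq, Prod.mk.injEq] at h
            obtain ⟨h1, h2⟩ := h
            subst h2
            simp only [pvR]
            have hmem : pvKey r0 ∈ e :: es ↔ pvKey r0 ∈ es := by simp [h0]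
            by_cases hc : pvKey r0 ∈ es ∧ u (pvKey r0) = false
            · rw [if_pos ⟨hmem.mpr hc.1, hc.2⟩, if_pos hc]
              refine ih rest x _ ?_ hq
              simp only [Bool.or_eq_false_iff]
              exact ⟨beq_eq_false_iff_ne.mpr (fun hh => h0 hh.symm), hu⟩
            · rw [if_neg (fun hc' => hc ⟨hmem.mp hc'.1, hc'.2⟩), if_neg hc]
              rw [ih rest x u hu hq]

theorem popFirst_none_keys (e : String) :
    ∀ (rem : List (List (String × String))), pvPopFirst e rem = none → ∀ r ∈ rem, pvKey r ≠ e := by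
  intro rem
  induction rem with
  | nil => intro h r hr; simp at hr
  | cons r0 rs ih =>
      intro h r hr
      simp only [pvPopFirst] at h
      by_cases h0 : pvKey r0 = e
      · rw [if_pos h0] at h; simp at h
      · rw [if_neg h0] at h
        cases hq : pvPopFirst e rs with
        | some pr => rw [hq] at h; obtain ⟨x, rest⟩ := pr; simp at h
        | none =>
            rcases List.mem_cons.mp hr with h1 | h1
            · exact h1 ▸ h0
            · exact ih hq r h1

theorem pvR_head_missing (e : String) (es : List String) :
    ∀ (rem : List (List (String × String))) (u : String → Bool),
    (∀ r ∈ rem, pvKey r ≠ e) → pvR (e :: es) u rem = pvR es u rem := by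
  intro rem
  induction rem with
  | nil => intro u h; rfl
  | cons r0 rs ih =>
      intro u h
      have h0 : pvKey r0 ≠ e := h r0 (List.mem_cons_self)
      have hmem : pvKey r0 ∈ e :: es ↔ pvKey r0 ∈ es := by simp [h0]
      simp only [pvR]
      by_cases hc : pvKey r0 ∈ es ∧ u (pvKey r0) = false
      · rw [if_pos ⟨hmem.mpr hc.1, hc.2⟩, if_pos hc]
        exact ih _ (fun r hr => h r (List.mem_cons_of_mem _ hr))
      · rw [if_neg (fun hc' => hc ⟨hmem.mp hc'.1, hc'.2⟩), if_neg hc]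
        rw [ih _ (fun r hr => h r (List.mem_cons_of_mem _ hr))]

theorem pvR_nil (u : String → Bool) :
    ∀ (rem : List (List (String × String))), pvR [] u rem = rem := by
  intro rem
  induction rem with
  | nil => rfl
  | cons r0 rs ih => simp [pvR, ih]

-- the core equivalence: A's pop loop = prioritized-from-the-original ++ rest-scan
theorem recd_eq_P_R (es : List String) (hnd : es.Nodup) :
    ∀ (rem : List (List (String × String))),
    pvRecd es rem = pvP es rem ++ pvR es (fun _ => false) rem := by
  induction es with
  | nil => intro rem; simp [pvRecd, pvP, pvR_nil]
  | cons e es ih =>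
      intro rem
      have he : e ∉ es := (List.nodup_cons.mp hnd).1
      have hnd' : es.Nodup := (List.nodup_cons.mp hnd).2
      simp only [pvRecd, pvP, List.filterMap_cons]
      cases hpf : pvPopFirst e rem with
      | none =>
          simp only [Option.map_none]
          rw [ih hnd' rem, pvR_head_missing e es rem _ (popFirst_none_keys e rem hpf)]
          rfl
      | some pr =>
          obtain ⟨r, rem'⟩ := pr
          simp only [Option.map_some]
          rw [ih hnd' rem']
          rw [pvR_erase e es he rem rem' r (fun _ => false) rfl hpf]
          have hP : pvP es rem' = pvP es rem := by
            unfold pvP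
            refine List.filterMap_congr ?_
            intro e' he'
            have hne : e' ≠ e := fun hh => he (hh ▸ he')
            exact popFirst_other e e' hne rem rem' r hpf
          rw [hP]
          rfl

-- B's single pass characterised: rest is the pvR scan, the dict holds each key's first match
theorem foldB_spec (es : List String) (wanted : PySem.Set String)
    (hw : ∀ k, PySem.Set.contains wanted k = true ↔ k ∈ es) :
    ∀ (rem : List (List (String × String))) (slot : PySem.Dict String (List (String × String)))
      (rest : List (List (String × String))),
    (rem.foldl (fun (st : PySem.Dict String (List (String × String)) × List (List (String × String))) row =>
      let e := pvKey row
      if PySem.Set.contains wanted e = true ∧ st.1.get? e = none then (st.1.insert e row, st.2)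
      else (st.1, st.2 ++ [row])) (slot, rest)).2
      = rest ++ pvR es (fun k => (slot.get? k).isSome) rem
    ∧ ∀ e, (rem.foldl (fun (st : PySem.Dict String (List (String × String)) × List (List (String × String))) row =>
      let e := pvKey row
      if PySem.Set.contains wanted e = true ∧ st.1.get? e = none then (st.1.insert e row, st.2)
      else (st.1, st.2 ++ [row])) (slot, rest)).1.get? e
      = match slot.get? e with
        | some v => some v
        | none => if e ∈ es then (pvPopFirst e rem).map Prod.fst else none := by
  intro rem
  induction rem with
  | nil =>
      intro slot rest
      refine ⟨by simp [pvR], ?_⟩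
      intro e
      cases h : slot.get? e <;> simp [h, pvPopFirst]
  | cons r rs ih =>
      intro slot rest
      simp only [List.foldl_cons]
      by_cases hc : PySem.Set.contains wanted (pvKey r) = true ∧ slot.get? (pvKey r) = none
      · rw [if_pos hc]
        obtain ⟨ih1, ih2⟩ := ih (slot.insert (pvKey r) r) rest
        constructor
        · rw [ih1]
          simp only [pvR]
          rw [if_pos ⟨(hw _).mp hc.1, by rw [hc.2]; rfl⟩]
          congr 1
          refine pvR_congr es rs _ _ ?_
          intro k
          rw [PySem.Dict.get?_insert]
          by_cases hk : k = pvKey r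
          · simp [hk, hc.2]
          · simp [hk]
        · intro e
          rw [ih2 e]
          rw [PySem.Dict.get?_insert]
          by_cases hk : e = pvKey r
          · subst hk
            rw [if_pos rfl, hc.2]
            simp only [pvPopFirst, if_pos rfl]
            rw [if_pos ((hw _).mp hc.1)]
            rfl
          · rw [if_neg hk]
            cases h : slot.get? e with
            | some v => simp
            | none =>
                simp only []
                by_cases hm : e ∈ es
                · rw [if_pos hm, if_pos hm]
                  simp only [pvPopFirst, if_neg (fun hh : pvKey r = e => hk hh.symm)]
                  exact (map_fst_consCase r _).symm
                · rw [if_neg hm, if_neg hm]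
      · rw [if_neg hc]
        obtain ⟨ih1, ih2⟩ := ih slot (rest ++ [r])
        constructor
        · rw [ih1]
          simp only [pvR]
          rw [if_neg ?_, List.append_assoc]
          · rfl
          · rintro ⟨hm, hs⟩
            refine hc ⟨(hw _).mpr hm, ?_⟩
            cases h : slot.get? (pvKey r) with
            | none => rfl
            | some v => rw [h] at hs; simp at hs
        · intro e
          rw [ih2 e]
          cases h : slot.get? e with
          | some v => simp
          | none =>
              simp only []
              by_cases hm : e ∈ es
              · rw [if_pos hm, if_pos hm]
                have hk : ¬ pvKey r = e := by
                  intro hh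
                  subst hh
                  exact hc ⟨(hw _).mpr hm, h⟩
                simp only [pvPopFirst, if_neg hk]
                exact (map_fst_consCase r _).symm
              · rw [if_neg hm, if_neg hm]

theorem main_eq (formatted : List (List (String × String))) (ch : Option (List (String × String))) (cf : Option (List (List (String × String)))) :
    filter_exact_value_results_py formatted ch cf = filter_exact_value_results_py_alt formatted ch cf := by
  unfold filter_exact_value_results_py filter_exact_value_results_py_alt
  rw [excerptsB_eq_A]
  set es := pvExcerptsA ch cf with hes_def
  by_cases hes : es = []
  · simp only [if_pos hes]
  · simp only [if_neg hes]
    have hw : ∀ k, PySem.Set.contains (PySem.Set.ofList es) k = true ↔ k ∈ es := by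
      intro k
      simp [PySem.Set.contains_eq_listContains, PySem.Set.mem_ofList]
    obtain ⟨h2, h1⟩ := foldB_spec es (PySem.Set.ofList es) hw formatted PySem.Dict.empty []
    rw [foldA_eq_recd es [] formatted, List.nil_append]
    rw [h2, List.nil_append]
    rw [List.filterMap_congr (g := fun e => (pvPopFirst e formatted).map Prod.fst)
      (fun e he => by rw [h1 e]; simp only []; rw [if_pos he]; rfl)]
    rw [pvR_congr es formatted (fun k => ((PySem.Dict.empty : PySem.Dict String (List (String × String))).get? k).isSome) (fun _ => false) (fun k => rfl)]
    exact recd_eq_P_R es (excerptsA_nodup ch cf) formatted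

-- ===== VERDICT (by name: the statement is the Claim_ definition above) =====
theorem filter_exact_value_results_py_spec : Claim_equal_filter_exact_value_results_py := by
  intro formatted chosen_candidate conflicting_candidates _
  exact main_eq formatted chosen_candidate conflicting_candidates
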